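-- pv_equiv track=rewrite | github.com/AdemMad/tidy_dvms | src/tidy_dvms/transformers.py | get_halves
-- ===== SOURCE A (Python) =====
-- def get_halves(min_headers):
--     """
--     Generate half labels based on blank splits in the min_headers list.
--
--     Returns:
--         A list of '1', '2', '3', '4' depending on the number of blank splits found.
--     """
--     space_indices = [i for i, val in enumerate(min_headers) if str(val).strip() == '']
--
--     if len(space_indices) == 1:
--         halves = (
--             ['1'] * space_indices[0] +
--             ['2'] * (len(min_headers) - space_indices[0] - 1)
--         )
--
--     elif len(space_indices) == 2:
--         halves = (
--             ['1'] * space_indices[0] +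
--             ['2'] * (space_indices[1] - space_indices[0] - 1) +
--             ['3'] * (len(min_headers) - space_indices[1] - 1)
--         )
--
--     elif len(space_indices) == 3:
--         halves = (
--             ['1'] * space_indices[0] +
--             ['2'] * (space_indices[1] - space_indices[0] - 1) +
--             ['3'] * (space_indices[2] - space_indices[1] - 1) +
--             ['4'] * (len(min_headers) - space_indices[2] - 1)
--         )
--
--     else:
--         raise ValueError(f"Unexpected number of blank splits: {len(space_indices)}")
--
--     return halves
-- ===== SOURCE B (Python) =====
-- def get_halves(min_headers):
--     """
--     Generate half labels based on blank splits in the min_headers list.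
--
--     Returns:
--         A list of '1', '2', '3', '4' depending on the number of blank splits found.
--     """
--     blanks = sum(1 for val in min_headers if str(val).strip() == '')
--     if blanks not in (1, 2, 3):
--         raise ValueError(f"Unexpected number of blank splits: {blanks}")
--     halves = []
--     n = 1
--     for val in min_headers:
--         if str(val).strip() == '':
--             n += 1
--         else:
--             halves.append(str(n))
--     return halves
-- ===== Notes on version B (the rewrite author's own statement) =====
-- stated objective: simpler
-- what changed: Replaces the index-list construction plus three replicate-arithmetic branches with one streaming pass that keeps a segment counter, incremented on each blank, emitting str(counter) for every non-blank header.
import Mathlib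
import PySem

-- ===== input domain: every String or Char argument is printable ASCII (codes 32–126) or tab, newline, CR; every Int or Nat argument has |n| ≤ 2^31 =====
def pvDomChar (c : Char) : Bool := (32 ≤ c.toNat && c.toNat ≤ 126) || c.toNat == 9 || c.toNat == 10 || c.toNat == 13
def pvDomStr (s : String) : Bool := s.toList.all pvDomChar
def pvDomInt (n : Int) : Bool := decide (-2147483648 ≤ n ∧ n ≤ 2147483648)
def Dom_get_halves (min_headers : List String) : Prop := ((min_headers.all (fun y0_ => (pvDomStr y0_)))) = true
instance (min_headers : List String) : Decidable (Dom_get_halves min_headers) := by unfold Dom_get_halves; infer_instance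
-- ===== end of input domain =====

-- B replaces A's blank-index list and three replicate-arithmetic branches with one
-- streaming pass keeping a segment counter (objective: simpler).

-- ===== PORT A =====
-- str(val).strip() == ''  (val is already a str)
def pvBlank (s : String) : Bool := PySem.Str.strip s == ""

-- [i for i, val in enumerate(min_headers) if str(val).strip() == ''] , with start parameter s
def pvIdxs (xs : List String) (s : Int) : List Int :=
  ((PySem.List.enumerate xs s).filter (fun p => pvBlank p.2)).map Prod.fst

def get_halves (min_headers : List String) : List String :=
  let space_indices := pvIdxs min_headers 0
  match space_indices with
  | [i] =>
      List.replicate i.toNat "1" ++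
      List.replicate ((min_headers.length : Int) - i - 1).toNat "2"
  | [i, j] =>
      List.replicate i.toNat "1" ++
      List.replicate (j - i - 1).toNat "2" ++
      List.replicate ((min_headers.length : Int) - j - 1).toNat "3"
  | [i, j, k] =>
      List.replicate i.toNat "1" ++
      List.replicate (j - i - 1).toNat "2" ++
      List.replicate (k - j - 1).toNat "3" ++
      List.replicate ((min_headers.length : Int) - k - 1).toNat "4"
  | _ => []   -- Python raises ValueError here; excluded by Pre_get_halves

-- ===== PORT B =====
-- blanks = sum(1 for val in min_headers if str(val).strip() == '')
def pvCount (xs : List String) : Int :=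
  xs.foldl (fun c v => if pvBlank v then c + 1 else c) 0

-- the for-loop: on a blank bump the counter, otherwise emit str(n)
def pvGo : List String → Int → List String
  | [], _ => []
  | v :: t, n => if pvBlank v then pvGo t (n + 1) else PySem.Int.toStr n :: pvGo t n

def get_halves_alt (min_headers : List String) : List String :=
  let blanks := pvCount min_headers
  if blanks = 1 ∨ blanks = 2 ∨ blanks = 3 then pvGo min_headers 1
  else []   -- Python raises ValueError here; excluded by Pre_get_halves

-- ===== PRECONDITION & SPEC =====
-- Exactly the inputs on which the Python A returns (both raise ValueError otherwise):
-- the number of blank entries is 1, 2 or 3.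
def Pre_get_halves (min_headers : List String) : Prop :=
  min_headers.countP pvBlank = 1 ∨ min_headers.countP pvBlank = 2 ∨ min_headers.countP pvBlank = 3
instance (min_headers : List String) : Decidable (Pre_get_halves min_headers) := by
  unfold Pre_get_halves; infer_instance

def pvWitness_get_halves : List String := ["a", " ", "b", "c"]

def Spec_get_halves (min_headers : List String) (out : List String) : Prop := out = get_halves_alt min_headers
instance (min_headers : List String) (out : List String) : Decidable (Spec_get_halves min_headers out) := by unfold Spec_get_halves; infer_instance

-- ===== CLAIM (what is proved, stated in full; the proofs are below) =====
def Claim_equal_get_halves : Prop := ∀ (min_headers : List String), Dom_get_halves min_headers → Pre_get_halves min_headers → Spec_get_halves min_headers (get_halves min_headers)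

-- ===== LEMMAS AND PROOFS =====

-- segment view shared by the proofs: labels the stretch from prev up to the next blank index
def pvSeg : List Int → Int → Int → Int → List String
  | [], n, len, prev => List.replicate (len - prev).toNat (PySem.Int.toStr n)
  | i :: is, n, len, prev =>
      List.replicate (i - prev).toNat (PySem.Int.toStr n) ++ pvSeg is (n + 1) len (i + 1)

theorem pvIdxs_nil (s : Int) : pvIdxs [] s = [] := rfl

theorem pvIdxs_cons (x : String) (t : List String) (s : Int) :
    pvIdxs (x :: t) s = if pvBlank x then s :: pvIdxs t (s + 1) else pvIdxs t (s + 1) := by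
  simp [pvIdxs, PySem.List.enumerate_cons, List.filter_cons]
  by_cases h : pvBlank x <;> simp [h]

theorem pvIdxs_ge (t : List String) (s : Int) : ∀ i ∈ pvIdxs t s, s ≤ i := by
  induction t generalizing s with
  | nil => simp [pvIdxs_nil]
  | cons x t ih =>
    intro i hi
    rw [pvIdxs_cons] at hi
    by_cases h : pvBlank x
    · simp [h] at hi
      rcases hi with rfl | hi
      · exact le_refl _
      · exact le_trans (by omega) (ih (s + 1) i hi)
    · simp [h] at hi
      exact le_trans (by omega) (ih (s + 1) i hi)

theorem pvSeg_pop (is : List Int) (n L s : Int) (hhd : ∀ i ∈ is, s + 1 ≤ i) (hL : s + 1 ≤ L) :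
    pvSeg is n L s = PySem.Int.toStr n :: pvSeg is n L (s + 1) := by
  cases is with
  | nil =>
    have h1 : (L - s).toNat = (L - (s + 1)).toNat + 1 := by omega
    simp [pvSeg, h1, List.replicate_succ]
  | cons i rest =>
    have hi : s + 1 ≤ i := hhd i (by simp)
    have h1 : (i - s).toNat = (i - (s + 1)).toNat + 1 := by omega
    simp [pvSeg, h1, List.replicate_succ]

theorem pvGo_eq_seg (t : List String) (s n : Int) :
    pvGo t n = pvSeg (pvIdxs t s) n (s + t.length) s := by
  induction t generalizing s n with
  | nil => simp [pvGo, pvIdxs_nil, pvSeg]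
  | cons x t ih =>
    rw [pvIdxs_cons]
    have harith : s + ((x :: t).length : Int) = (s + 1) + (t.length : Int) := by
      simp; omega
    by_cases h : pvBlank x
    · simp only [h, if_true, pvGo, pvSeg]
      rw [harith]
      simp [ih (s + 1) (n + 1)]
    · simp only [h, Bool.false_eq_true, if_false, pvGo]
      rw [harith, pvSeg_pop _ _ _ _ (pvIdxs_ge t (s + 1)) (by omega)]
      rw [ih (s + 1) n]

theorem length_pvIdxs (t : List String) (s : Int) :
    (pvIdxs t s).length = t.countP pvBlank := by
  induction t generalizing s with
  | nil => simp [pvIdxs_nil]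
  | cons x t ih =>
    rw [pvIdxs_cons, List.countP_cons]
    by_cases h : pvBlank x <;> simp [h, ih]

theorem pvCount_foldl (t : List String) (c : Int) :
    t.foldl (fun c v => if pvBlank v then c + 1 else c) c = c + t.countP pvBlank := by
  induction t generalizing c with
  | nil => simp
  | cons x t ih =>
    rw [List.countP_cons, List.foldl_cons]
    by_cases h : pvBlank x <;> simp [h, ih] <;> try omega

theorem pvCount_eq (t : List String) : pvCount t = t.countP pvBlank := by
  simp [pvCount, pvCount_foldl]

theorem toStr_one : PySem.Int.toStr 1 = "1" := by decide
theorem toStr_two : PySem.Int.toStr 2 = "2" := by decide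
theorem toStr_three : PySem.Int.toStr 3 = "3" := by decide
theorem toStr_four : PySem.Int.toStr 4 = "4" := by decide

-- ===== VERDICT (by name: the statement is the Claim_ definition above) =====
theorem get_halves_spec : Claim_equal_get_halves := by
  intro xs _ hpre
  unfold Spec_get_halves get_halves get_halves_alt
  have hc : pvCount xs = xs.countP pvBlank := pvCount_eq xs
  have hlen : (pvIdxs xs 0).length = xs.countP pvBlank := length_pvIdxs xs 0
  have hgo : pvGo xs 1 = pvSeg (pvIdxs xs 0) 1 (xs.length : Int) 0 := by
    have := pvGo_eq_seg xs 0 1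
    simpa using this
  have hsub : ∀ a b : Int, a - (b + 1) = a - b - 1 := fun a b => by ring
  rcases hpre with h1 | h2 | h3
  · rw [if_pos (by omega : pvCount xs = 1 ∨ pvCount xs = 2 ∨ pvCount xs = 3)]
    rw [h1] at hlen
    obtain ⟨i, hi⟩ : ∃ i, pvIdxs xs 0 = [i] := by
      match hx : pvIdxs xs 0 with
      | [i] => exact ⟨i, rfl⟩
      | [] | _ :: _ :: _ => rw [hx] at hlen; simp at hlen
    rw [hgo, hi]
    norm_num [pvSeg, toStr_one, toStr_two, hsub]
  · rw [if_pos (by omega : pvCount xs = 1 ∨ pvCount xs = 2 ∨ pvCount xs = 3)]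
    rw [h2] at hlen
    obtain ⟨i, j, hij⟩ : ∃ i j, pvIdxs xs 0 = [i, j] := by
      match hx : pvIdxs xs 0 with
      | [i, j] => exact ⟨i, j, rfl⟩
      | [] | [_] | _ :: _ :: _ :: _ => rw [hx] at hlen; simp at hlen
    rw [hgo, hij]
    norm_num [pvSeg, toStr_one, toStr_two, toStr_three, hsub, List.append_assoc]
  · rw [if_pos (by omega : pvCount xs = 1 ∨ pvCount xs = 2 ∨ pvCount xs = 3)]
    rw [h3] at hlen
    obtain ⟨i, j, k, hijk⟩ : ∃ i j k, pvIdxs xs 0 = [i, j, k] := by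
      match hx : pvIdxs xs 0 with
      | [i, j, k] => exact ⟨i, j, k, rfl⟩
      | [] | [_] | [_, _] | _ :: _ :: _ :: _ :: _ => rw [hx] at hlen; simp at hlen
    rw [hgo, hijk]
    norm_num [pvSeg, toStr_one, toStr_two, toStr_three, toStr_four, hsub, List.append_assoc]
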